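-- pv_equiv track=rewrite | github.com/BruceMD/CR_Evaluation | viewGold.py | majorLabel
-- ===== SOURCE A (Python) =====
-- def majorLabel(values):
--     # find the majority of records per GR and choose the most common one as the label
--     # if it is the same number of occurrences, then choose the first alphabetical/sequential one
--     dic = {}
--     for v in values:
--         if v[:12] not in dic:
--             dic[v[:12]] = 1
--         else:
--             dic[v[:12]] += 1
--
--     tempLabel = ""
--     tempMax = 0
--     for k, v in dic.items():
--         if v > tempMax:
--             tempLabel = k
--             tempMax = v
--         elif v == tempMax:
--             tempLabel = sorted([k, tempLabel])[0]  # just takes the first one alphabetically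
--
--     return tempLabel
-- ===== SOURCE B (Python) =====
-- def majorLabel(values):
--     # sort the 12-char prefixes, then one linear scan over runs of equal
--     # neighbours: the first run of maximal length gives the label (no dict)
--     ps = sorted(v[:12] for v in values)
--     best, bestLen = "", 0
--     runKey, runLen = None, 0
--     for p in ps:
--         if p == runKey:
--             runLen += 1
--         else:
--             runKey, runLen = p, 1
--         if runLen > bestLen:
--             best, bestLen = runKey, runLen
--     return best
-- ===== Notes on version B (the rewrite author's own statement) =====
-- stated objective: alternative
-- what changed: B drops A's prefix-count dictionary entirely: it sorts the 12-char prefixes and makes one linear scan over runs of equal neighbours, keeping the first (hence alphabetically smallest) run of maximal length.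
import Mathlib
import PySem

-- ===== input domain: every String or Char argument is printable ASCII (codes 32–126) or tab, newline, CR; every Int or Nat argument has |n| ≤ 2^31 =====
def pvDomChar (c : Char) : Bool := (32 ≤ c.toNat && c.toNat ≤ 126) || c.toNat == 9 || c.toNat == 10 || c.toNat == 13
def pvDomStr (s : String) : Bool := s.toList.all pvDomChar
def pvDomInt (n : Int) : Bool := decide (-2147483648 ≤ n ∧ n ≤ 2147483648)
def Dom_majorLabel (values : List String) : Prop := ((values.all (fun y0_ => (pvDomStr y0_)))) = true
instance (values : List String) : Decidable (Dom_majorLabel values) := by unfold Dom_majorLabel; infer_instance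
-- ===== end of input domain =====

-- B replaces A's prefix-count dictionary and fused running-max loop by sorting the
-- 12-char prefixes and scanning runs of equal neighbours once: alternative algorithm, same result.

-- ===== PORT A =====
def majorLabel (values : List String) : String :=
  let dic := values.foldl (fun d v =>
      if d.contains (PySem.Str.slice v none (some 12)) = false then
        d.insert (PySem.Str.slice v none (some 12)) 1
      else
        d.insert (PySem.Str.slice v none (some 12))
          (d.getD (PySem.Str.slice v none (some 12)) 0 + 1))
      (PySem.Dict.empty : PySem.Dict String Int)
  let r := dic.items.foldl (fun (st : String × Int) kv =>
      if st.2 < kv.2 then (kv.1, kv.2)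
      else if kv.2 = st.2 then
        ((PySem.List.sorted [kv.1, st.1] (fun x => x) false).headD "", st.2)
      else st) ("", 0)
  r.1

-- ===== PORT B =====
-- sorted prefixes, then one pass over runs of equal neighbours;
-- state = (best, bestLen, runKey, runLen), runKey starts as Python's None.
def majorLabel_alt (values : List String) : String :=
  let ps := PySem.List.sorted (values.map (fun v => PySem.Str.slice v none (some 12))) (fun x => x) false
  let st := ps.foldl (fun (st : String × Int × Option String × Int) p =>
      let runLen := if (some p == st.2.2.1) then st.2.2.2 + 1 else 1
      if st.2.1 < runLen then (p, runLen, some p, runLen)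
      else (st.1, st.2.1, some p, runLen))
    ("", 0, none, 0)
  st.1

-- ===== PRECONDITION & SPEC =====
def Spec_majorLabel (values : List String) (out : String) : Prop := out = majorLabel_alt values
instance (values : List String) (out : String) : Decidable (Spec_majorLabel values out) := by unfold Spec_majorLabel; infer_instance

-- ===== CLAIM =====
def Claim_equal_majorLabel : Prop := ∀ (values : List String), Dom_majorLabel values → Spec_majorLabel values (majorLabel values)

-- ===== LEMMAS AND PROOFS =====

-- A's fused selection loop body, named for the proofs.
def pvStep (st kv : String × Int) : String × Int :=
  if st.2 < kv.2 then kv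
  else if kv.2 = st.2 then
    ((PySem.List.sorted [kv.1, st.1] (fun x => x) false).headD "", st.2)
  else st

-- B's run-scan loop body, named for the proofs.
def pvBStep (st : String × Int × Option String × Int) (p : String) : String × Int × Option String × Int :=
  let runLen := if (some p == st.2.2.1) then st.2.2.2 + 1 else 1
  if st.2.1 < runLen then (p, runLen, some p, runLen)
  else (st.1, st.2.1, some p, runLen)

-- running maximum of the counts, started at 0 (A's tempMax)
def pvMaxC (l : List (String × Int)) : Int := l.foldl (fun m p => max m p.2) 0

-- keys whose count equals m
def pvArg (l : List (String × Int)) (m : Int) : List String :=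
  (l.filter (fun p => p.2 == m)).map (·.1)

-- min of a list of strings, "" when empty
def pvMinS : List String → String
  | [] => ""
  | x :: t => t.foldl min x

-- the distinct elements of l with their counts (= Counter(l).items())
def pvKC (l : List String) : List (String × Int) :=
  (PySem.Set.ofList l).map (fun k => (k, (l.count k : Int)))

def pvM (l : List String) : Int := pvMaxC (pvKC l)

def pvAns (l : List String) : String := pvMinS (pvArg (pvKC l) (pvM l))

-- "a is the alphabetically smallest most-frequent element of l"
def pvIsAns (l : List String) (a : String) : Prop :=
  a ∈ l ∧ (l.count a : Int) = pvM l ∧ ∀ k ∈ l, (l.count k : Int) = pvM l → a ≤ k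

theorem pvSortedHead (a b : String) :
    (PySem.List.sorted [a, b] (fun x => x) false).headD "" = min a b := by
  simp only [PySem.List.sorted, PySem.List.insertBy, List.foldl]
  rcases lt_or_ge b a with h | h
  · simp [h, min_eq_right h.le]
  · simp [not_lt.mpr h, min_eq_left h]

theorem pvMaxC_spec (l : List (String × Int)) :
    0 ≤ pvMaxC l ∧ ∀ p ∈ l, p.2 ≤ pvMaxC l := by
  have h := PySem.List.le_foldl_max (l.map (·.2)) 0
  rw [List.foldl_map] at h
  exact ⟨h.1, fun p hp => h.2 p.2 (List.mem_map_of_mem hp)⟩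

theorem pvMaxC_append (l : List (String × Int)) (p : String × Int) :
    pvMaxC (l ++ [p]) = max (pvMaxC l) p.2 := by
  simp [pvMaxC, List.foldl_append]

theorem pvMaxC_mem (l : List (String × Int)) (hne : l ≠ [])
    (hpos : ∀ p ∈ l, 1 ≤ p.2) : ∃ q ∈ l, q.2 = pvMaxC l := by
  induction l using List.reverseRecOn with
  | nil => exact absurd rfl hne
  | append_singleton l p ih =>
    rw [pvMaxC_append]
    rcases (by omega : pvMaxC l ≤ p.2 ∨ p.2 < pvMaxC l) with h | h
    · exact ⟨p, by simp, (max_eq_right h).symm⟩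
    · have hl : l ≠ [] := by
        intro e; subst e
        have : (1 : Int) ≤ p.2 := hpos p (by simp)
        simp [pvMaxC] at h; omega
      obtain ⟨q, hq, hqv⟩ := ih hl (fun r hr => hpos r (by simp [hr]))
      exact ⟨q, by simp [hq], by rw [hqv, max_eq_left h.le]⟩

theorem pvArg_ne_nil (l : List (String × Int)) (hne : l ≠ [])
    (hpos : ∀ p ∈ l, 1 ≤ p.2) : pvArg l (pvMaxC l) ≠ [] := by
  obtain ⟨q, hq, hqv⟩ := pvMaxC_mem l hne hpos
  have : q.1 ∈ pvArg l (pvMaxC l) :=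
    List.mem_map_of_mem (List.mem_filter.mpr ⟨hq, by simp [hqv]⟩)
  exact List.ne_nil_of_mem this

theorem pvFoldlMin_spec (t : List String) : ∀ x : String,
    (t.foldl min x ∈ x :: t) ∧ ∀ z ∈ x :: t, t.foldl min x ≤ z := by
  induction t with
  | nil => intro x; simp
  | cons y s ih =>
    intro x
    have h1 := ih (min x y)
    rw [List.foldl_cons]
    constructor
    · rcases List.mem_cons.mp h1.1 with hm | hm
      · rcases le_total x y with hxy | hxy
        · rw [hm, min_eq_left hxy]; exact List.mem_cons_self
        · rw [hm, min_eq_right hxy]; exact List.mem_cons_of_mem _ List.mem_cons_self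
      · exact List.mem_cons_of_mem _ (List.mem_cons_of_mem _ hm)
    · intro z hz
      rcases List.mem_cons.mp hz with rfl | hz'
      · exact le_trans (h1.2 _ List.mem_cons_self) (min_le_left _ _)
      · rcases List.mem_cons.mp hz' with rfl | hz''
        · exact le_trans (h1.2 _ List.mem_cons_self) (min_le_right _ _)
        · exact h1.2 z (List.mem_cons_of_mem _ hz'')

theorem pvMinS_spec (xs : List String) (h : xs ≠ []) :
    pvMinS xs ∈ xs ∧ ∀ x ∈ xs, pvMinS xs ≤ x := by
  rcases xs with _ | ⟨x, t⟩
  · exact absurd rfl h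
  · exact pvFoldlMin_spec t x

-- membership characterizations
theorem pvMem_KC (l : List String) (k : String) (c : Int) :
    (k, c) ∈ pvKC l ↔ k ∈ l ∧ c = (l.count k : Int) := by
  unfold pvKC
  rw [List.mem_map]
  constructor
  · rintro ⟨a, ha, he⟩
    obtain ⟨rfl, rfl⟩ : a = k ∧ (l.count a : Int) = c := by
      exact ⟨congrArg Prod.fst he, congrArg Prod.snd he⟩
    exact ⟨(PySem.Set.mem_ofList l a).mp ha, rfl⟩
  · rintro ⟨hk, rfl⟩
    exact ⟨k, (PySem.Set.mem_ofList l k).mpr hk, rfl⟩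

theorem pvMem_arg (l : List String) (m : Int) (k : String) :
    k ∈ pvArg (pvKC l) m ↔ k ∈ l ∧ (l.count k : Int) = m := by
  unfold pvArg
  rw [List.mem_map]
  constructor
  · rintro ⟨⟨a, c⟩, hp, rfl⟩
    have h2 := List.mem_filter.mp hp
    have h3 := (pvMem_KC l a c).mp h2.1
    have h4 : c = m := by simpa using h2.2
    exact ⟨h3.1, by rw [← h3.2, h4]⟩
  · rintro ⟨hk, hc⟩
    exact ⟨(k, m), List.mem_filter.mpr ⟨(pvMem_KC l k m).mpr ⟨hk, hc.symm⟩, by simp⟩, rfl⟩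

theorem pvKC_pos (l : List String) : ∀ p ∈ pvKC l, 1 ≤ p.2 := by
  rintro ⟨a, c⟩ hp
  have h3 := (pvMem_KC l a c).mp hp
  have h4 := List.count_pos_iff.mpr h3.1
  show 1 ≤ c
  rw [h3.2]; exact_mod_cast h4

theorem pvKC_ne_nil (l : List String) (h : l ≠ []) : pvKC l ≠ [] := by
  rcases l with _ | ⟨x, t⟩
  · exact absurd rfl h
  · intro e
    have hx : (x, ((x :: t).count x : Int)) ∈ pvKC (x :: t) :=
      (pvMem_KC _ x _).mpr ⟨by simp, rfl⟩
    rw [e] at hx; exact absurd hx (by simp)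

theorem pvM_ub (l : List String) : ∀ k ∈ l, (l.count k : Int) ≤ pvM l := by
  intro k hk
  exact (pvMaxC_spec (pvKC l)).2 (k, (l.count k : Int)) ((pvMem_KC l k _).mpr ⟨hk, rfl⟩)

theorem pvM_exists (l : List String) (h : l ≠ []) :
    ∃ k ∈ l, (l.count k : Int) = pvM l := by
  obtain ⟨⟨a, c⟩, hq, hv⟩ := pvMaxC_mem (pvKC l) (pvKC_ne_nil l h) (pvKC_pos l)
  have h3 := (pvMem_KC l a c).mp hq
  exact ⟨a, h3.1, by rw [← h3.2]; exact hv⟩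

theorem pvM_pos (l : List String) (h : l ≠ []) : 1 ≤ pvM l := by
  obtain ⟨k, hk, hv⟩ := pvM_exists l h
  have h4 := List.count_pos_iff.mpr hk
  rw [← hv]; exact_mod_cast h4

theorem pvM_eq_of (l : List String) (m : Int)
    (h1 : ∀ k ∈ l, (l.count k : Int) ≤ m) (h2 : ∃ k ∈ l, (l.count k : Int) = m) :
    pvM l = m := by
  obtain ⟨k0, hk0, hv0⟩ := h2
  rcases (List.ne_nil_of_mem hk0 : l ≠ []) with _
  obtain ⟨k1, hk1, hv1⟩ := pvM_exists l (List.ne_nil_of_mem hk0)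
  have := h1 k1 hk1
  have := pvM_ub l k0 hk0
  omega

theorem pvAns_isAns (l : List String) (h : l ≠ []) : pvIsAns l (pvAns l) := by
  have hne := pvArg_ne_nil (pvKC l) (pvKC_ne_nil l h) (pvKC_pos l)
  have hmin := pvMinS_spec _ hne
  have hm := (pvMem_arg l (pvM l) (pvAns l)).mp hmin.1
  exact ⟨hm.1, hm.2, fun k hk hkc => hmin.2 k ((pvMem_arg l (pvM l) k).mpr ⟨hk, hkc⟩)⟩

theorem pvIsAns_unique (l : List String) (a b : String)
    (ha : pvIsAns l a) (hb : pvIsAns l b) : a = b := by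
  obtain ⟨ha1, ha2, ha3⟩ := ha
  obtain ⟨hb1, hb2, hb3⟩ := hb
  exact le_antisymm (ha3 b hb1 hb2) (hb3 a ha1 ha2)

theorem pvM_perm (l l' : List String) (hp : l.Perm l') : pvM l = pvM l' := by
  rcases l with _ | ⟨x, t⟩
  · rw [← hp.nil_eq]
  · symm
    apply pvM_eq_of
    · intro k hk
      rw [← hp.count_eq]
      exact pvM_ub _ k (hp.mem_iff.mpr hk)
    · obtain ⟨k, hk, hv⟩ := pvM_exists (x :: t) (by simp)
      exact ⟨k, hp.mem_iff.mp hk, by rw [← hp.count_eq]; exact hv⟩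

theorem pvAns_perm (l l' : List String) (h : l ≠ []) (hp : l.Perm l') :
    pvAns l = pvAns l' := by
  have h' : l' ≠ [] := by
    intro e; subst e; exact h hp.symm.nil_eq.symm
  apply pvIsAns_unique l _ _ (pvAns_isAns l h)
  obtain ⟨h1, h2, h3⟩ := pvAns_isAns l' h'
  refine ⟨hp.mem_iff.mpr h1, ?_, ?_⟩
  · rw [hp.count_eq, h2, pvM_perm l l' hp]
  · intro k hk hkc
    exact h3 k (hp.mem_iff.mp hk) (by rw [← hp.count_eq, hkc, pvM_perm l l' hp])

-- ---- A side ----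

theorem pvMinS_append (xs : List String) (y : String) (h : xs ≠ []) :
    pvMinS (xs ++ [y]) = min (pvMinS xs) y := by
  cases xs with
  | nil => exact absurd rfl h
  | cons x t => simp [pvMinS, List.foldl_append]

theorem pvLoop_eq (l : List (String × Int)) (hpos : ∀ p ∈ l, 1 ≤ p.2) :
    l.foldl pvStep ("", 0) = (pvMinS (pvArg l (pvMaxC l)), pvMaxC l) := by
  induction l using List.reverseRecOn with
  | nil => rfl
  | append_singleton l p ih =>
    have hposl : ∀ p ∈ l, 1 ≤ p.2 := fun r hr => hpos r (by simp [hr])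
    have hpp : (1 : Int) ≤ p.2 := hpos p (by simp)
    rw [List.foldl_append, List.foldl_cons, List.foldl_nil, ih hposl, pvMaxC_append]
    rcases lt_trichotomy (pvMaxC l) p.2 with h | h | h
    · have hfil : l.filter (fun q => q.2 == p.2) = [] := by
        rw [List.filter_eq_nil_iff]
        intro q hq
        have := (pvMaxC_spec l).2 q hq
        simp only [beq_iff_eq]; omega
      simp [pvStep, pvArg, h, max_eq_right h.le, List.filter_append, hfil, pvMinS]
    · have hl : l ≠ [] := by
        intro e; subst e; simp [pvMaxC] at h; omega
      have hA := pvArg_ne_nil l hl hposl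
      have harg : pvArg (l ++ [p]) (pvMaxC l) = pvArg l (pvMaxC l) ++ [p.1] := by
        simp [pvArg, List.filter_append, ← h]
      rw [← h, max_self, harg]
      simp only [pvStep]
      rw [if_neg (by omega), if_pos (by omega), pvSortedHead, pvMinS_append _ _ hA, min_comm]
    · have harg : pvArg (l ++ [p]) (pvMaxC l) = pvArg l (pvMaxC l) := by
        have : (p.2 == pvMaxC l) = false := by simp; omega
        simp [pvArg, List.filter_append, this]
      rw [max_eq_left h.le]
      simp only [pvStep]
      rw [if_neg (by omega), if_neg (by omega), harg]

theorem pvBuild_eq (values : List String) (d : PySem.Dict String Int) :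
    values.foldl (fun d v =>
      if d.contains (PySem.Str.slice v none (some 12)) = false then
        d.insert (PySem.Str.slice v none (some 12)) 1
      else
        d.insert (PySem.Str.slice v none (some 12))
          (d.getD (PySem.Str.slice v none (some 12)) 0 + 1)) d
    = values.foldl (fun d v =>
        d.insert (PySem.Str.slice v none (some 12))
          (d.getD (PySem.Str.slice v none (some 12)) 0 + 1)) d := by
  induction values generalizing d with
  | nil => rfl
  | cons v t ih =>
    rw [List.foldl_cons, List.foldl_cons, ← ih]
    congr 1
    by_cases hc : d.contains (PySem.Str.slice v none (some 12)) = true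
    · simp [hc]
    · have hc' : d.contains (PySem.Str.slice v none (some 12)) = false := by
        cases h : d.contains (PySem.Str.slice v none (some 12)) <;> simp_all
      rw [if_pos hc', PySem.Dict.getD_of_not_contains d 0 hc']
      norm_num

theorem pvA_eq (values : List String) :
    majorLabel values = pvAns (values.map (fun v => PySem.Str.slice v none (some 12))) := by
  have hc : (values.foldl (fun d v =>
      if d.contains (PySem.Str.slice v none (some 12)) = false then
        d.insert (PySem.Str.slice v none (some 12)) 1
      else
        d.insert (PySem.Str.slice v none (some 12))
          (d.getD (PySem.Str.slice v none (some 12)) 0 + 1))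
      (PySem.Dict.empty : PySem.Dict String Int)).items
      = pvKC (values.map (fun v => PySem.Str.slice v none (some 12))) := by
    rw [pvBuild_eq]
    rw [show (values.foldl (fun d v =>
        d.insert (PySem.Str.slice v none (some 12))
          (d.getD (PySem.Str.slice v none (some 12)) 0 + 1))
        (PySem.Dict.empty : PySem.Dict String Int))
      = PySem.Dict.counter (values.map (fun v => PySem.Str.slice v none (some 12))) from by
        rw [← PySem.Dict.foldl_insert_getD_add_one_eq_counter, List.foldl_map]]
    exact PySem.Dict.items_counter _
  refine (congrArg (fun L : List (String × Int) => (L.foldl pvStep ("", 0)).1) hc).trans ?_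
  rw [pvLoop_eq _ (pvKC_pos _)]
  rfl

-- ---- B side ----

theorem pvCount_app_ne (M : List String) (p k : String) (hk : k ≠ p) :
    (M ++ [p]).count k = M.count k := by
  simp [List.count_append, Ne.symm hk]

theorem pvCount_app_self (M : List String) (p : String) :
    (M ++ [p]).count p = M.count p + 1 := by
  simp [List.count_append]

theorem pvM_app_gt (M : List String) (q : String) (_hMne : M ≠ [])
    (hc : pvM M < (M.count q : Int) + 1) : pvM (M ++ [q]) = (M.count q : Int) + 1 := by
  apply pvM_eq_of
  · intro k hk
    by_cases hkq : k = q
    · subst hkq; rw [pvCount_app_self]; push_cast; omega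
    · rw [pvCount_app_ne M q k hkq]
      rcases List.mem_append.mp hk with h | h
      · have := pvM_ub M k h; omega
      · simp at h; exact absurd h hkq
  · exact ⟨q, by simp, by rw [pvCount_app_self]; push_cast; ring⟩

theorem pvAns_app_gt (M : List String) (q : String) (hMne : M ≠ [])
    (hc : pvM M < (M.count q : Int) + 1) : pvAns (M ++ [q]) = q := by
  apply pvIsAns_unique (M ++ [q]) _ _ (pvAns_isAns _ (by simp))
  refine ⟨by simp, ?_, ?_⟩
  · rw [pvM_app_gt M q hMne hc, pvCount_app_self]; push_cast; ring
  · intro k hk hkc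
    by_cases hkq : k = q
    · subst hkq; exact le_refl _
    · rw [pvM_app_gt M q hMne hc, pvCount_app_ne M q k hkq] at hkc
      rcases List.mem_append.mp hk with h | h
      · have := pvM_ub M k h; omega
      · simp at h; exact absurd h hkq

theorem pvM_app_eq (M : List String) (q : String) (hMne : M ≠ []) (hq : q ∈ M)
    (hc : (M.count q : Int) + 1 ≤ pvM M) : pvM (M ++ [q]) = pvM M := by
  apply pvM_eq_of
  · intro k hk
    by_cases hkq : k = q
    · subst hkq; rw [pvCount_app_self]; push_cast; omega
    · rw [pvCount_app_ne M q k hkq]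
      rcases List.mem_append.mp hk with h | h
      · exact pvM_ub M k h
      · simp at h; exact absurd h hkq
  · obtain ⟨k, hk, hv⟩ := pvM_exists M hMne
    have hkq : k ≠ q := by intro e; subst e; omega
    exact ⟨k, by simp [hk], by rw [pvCount_app_ne M q k hkq]; exact hv⟩

theorem pvAns_app_eq (M : List String) (q : String) (hMne : M ≠ []) (hq : q ∈ M)
    (hqmax : ∀ x ∈ M, x ≤ q) (hc : (M.count q : Int) + 1 ≤ pvM M) :
    pvAns (M ++ [q]) = pvAns M := by
  obtain ⟨ha1, ha2, ha3⟩ := pvAns_isAns M hMne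
  apply pvIsAns_unique (M ++ [q]) _ _ (pvAns_isAns _ (by simp))
  have hanq : pvAns M ≠ q := by intro e; rw [e] at ha2; omega
  refine ⟨by simp [ha1], ?_, ?_⟩
  · rw [pvM_app_eq M q hMne hq hc, pvCount_app_ne M q _ hanq]; exact ha2
  · intro k hk hkc
    rw [pvM_app_eq M q hMne hq hc] at hkc
    by_cases hkq : k = q
    · subst hkq; exact hqmax _ ha1
    · rw [pvCount_app_ne M q k hkq] at hkc
      rcases List.mem_append.mp hk with h | h
      · exact ha3 k h hkc
      · simp at h; exact absurd h hkq

theorem pvM_app_new (M : List String) (p : String) (hMne : M ≠ []) (hp : p ∉ M) :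
    pvM (M ++ [p]) = pvM M := by
  apply pvM_eq_of
  · intro k hk
    by_cases hkp : k = p
    · subst hkp
      rw [pvCount_app_self, List.count_eq_zero.mpr hp]
      have := pvM_pos M hMne
      push_cast; omega
    · rw [pvCount_app_ne M p k hkp]
      rcases List.mem_append.mp hk with h | h
      · exact pvM_ub M k h
      · simp at h; exact absurd h hkp
  · obtain ⟨k, hk, hv⟩ := pvM_exists M hMne
    have hkp : k ≠ p := fun e => hp (e ▸ hk)
    exact ⟨k, by simp [hk], by rw [pvCount_app_ne M p k hkp]; exact hv⟩

theorem pvAns_app_new (M : List String) (p : String) (hMne : M ≠ []) (hp : p ∉ M)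
    (hmax : ∀ x ∈ M, x ≤ p) : pvAns (M ++ [p]) = pvAns M := by
  obtain ⟨ha1, ha2, ha3⟩ := pvAns_isAns M hMne
  apply pvIsAns_unique (M ++ [p]) _ _ (pvAns_isAns _ (by simp))
  have hanp : pvAns M ≠ p := fun e => hp (e ▸ ha1)
  refine ⟨by simp [ha1], ?_, ?_⟩
  · rw [pvM_app_new M p hMne hp, pvCount_app_ne M p _ hanp]; exact ha2
  · intro k hk hkc
    rw [pvM_app_new M p hMne hp] at hkc
    by_cases hkp : k = p
    · subst hkp; exact hmax _ ha1
    · rw [pvCount_app_ne M p k hkp] at hkc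
      rcases List.mem_append.mp hk with h | h
      · exact ha3 k h hkc
      · simp at h; exact absurd h hkp

theorem pvAns_single (p : String) : pvAns [p] = p := by
  simp [pvAns, pvArg, pvKC, pvM, pvMaxC, pvMinS, PySem.Set.ofList, PySem.Set.add,
    PySem.Set.contains, List.count_cons]

theorem pvM_single (p : String) : pvM [p] = 1 := by
  simp [pvKC, pvM, pvMaxC, PySem.Set.ofList, PySem.Set.add, PySem.Set.contains,
    List.count_cons]

theorem pvBStep_same (a : String) (m c : Int) (p : String) :
    pvBStep (a, m, some p, c) p
      = if m < c + 1 then (p, c + 1, some p, c + 1) else (a, m, some p, c + 1) := by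
  simp only [pvBStep, beq_self_eq_true, if_true]

theorem pvBStep_diff (a : String) (m c : Int) (p q : String) (h : p ≠ q) :
    pvBStep (a, m, some q, c) p
      = if m < 1 then (p, 1, some p, 1) else (a, m, some p, 1) := by
  simp [pvBStep, h]

theorem pvBfold (L : List String) : ∀ p : String, (L ++ [p]).Pairwise (· ≤ ·) →
    (L ++ [p]).foldl pvBStep ("", 0, none, 0)
      = (pvAns (L ++ [p]), pvM (L ++ [p]), some p, ((L ++ [p]).count p : Int)) := by
  induction L using List.reverseRecOn with
  | nil =>
    intro p _
    show pvBStep ("", 0, none, 0) p = _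
    simp only [List.nil_append]
    rw [pvAns_single, pvM_single]
    simp [pvBStep]
  | append_singleton l q ih =>
    intro p hs
    have hpre : (l ++ [q]).Pairwise (· ≤ ·) := hs.sublist (List.sublist_append_left _ _)
    have hMne : l ++ [q] ≠ [] := by simp
    have hLp : ∀ x ∈ l ++ [q], x ≤ p := by
      have h2 := List.pairwise_append.mp hs
      intro x hx; exact h2.2.2 x hx p (by simp)
    have hMq : ∀ x ∈ l ++ [q], x ≤ q := by
      have h2 := List.pairwise_append.mp hpre
      intro x hx
      rcases List.mem_append.mp hx with h | h
      · exact h2.2.2 x h q (by simp)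
      · simp at h; subst h; exact le_refl _
    rw [List.foldl_append, ih q hpre, List.foldl_cons, List.foldl_nil]
    by_cases hpq : p = q
    · subst hpq
      by_cases hlt : pvM (l ++ [p]) < ((l ++ [p]).count p : Int) + 1
      · rw [pvBStep_same, if_pos hlt, pvAns_app_gt (l ++ [p]) p hMne hlt,
          pvM_app_gt (l ++ [p]) p hMne hlt, pvCount_app_self (l ++ [p]) p]
        push_cast; ring_nf
      · have hc : ((l ++ [p]).count p : Int) + 1 ≤ pvM (l ++ [p]) := by omega
        rw [pvBStep_same, if_neg hlt, pvAns_app_eq (l ++ [p]) p hMne (by simp) hMq hc,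
          pvM_app_eq (l ++ [p]) p hMne (by simp) hc, pvCount_app_self (l ++ [p]) p]
        push_cast; ring_nf
    · have hpnotin : p ∉ l ++ [q] := by
        intro hin
        exact hpq (le_antisymm (hMq p hin) (hLp q (by simp)))
      have hpos := pvM_pos (l ++ [q]) hMne
      rw [pvBStep_diff _ _ _ _ _ hpq, if_neg (by omega),
        pvAns_app_new (l ++ [q]) p hMne hpnotin hLp, pvM_app_new (l ++ [q]) p hMne hpnotin,
        pvCount_app_self (l ++ [q]) p, List.count_eq_zero.mpr hpnotin]
      norm_num

theorem pvB_eq (values : List String) :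
    majorLabel_alt values
      = pvAns (PySem.List.sorted (values.map (fun v => PySem.Str.slice v none (some 12))) (fun x => x) false) := by
  have hB : majorLabel_alt values
      = ((PySem.List.sorted (values.map (fun v => PySem.Str.slice v none (some 12)))
          (fun x => x) false).foldl pvBStep ("", 0, none, 0)).1 := rfl
  have hpw := PySem.List.sorted_pairwise (values.map (fun v => PySem.Str.slice v none (some 12)))
    (fun x => x)
  rw [hB]
  generalize hps : PySem.List.sorted (values.map (fun v => PySem.Str.slice v none (some 12)))
      (fun x => x) false = ps at *
  rcases ps.eq_nil_or_concat' with rfl | ⟨L, p, rfl⟩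
  · rfl
  · rw [pvBfold L p hpw]

-- ===== VERDICT =====
theorem majorLabel_spec : Claim_equal_majorLabel := by
  intro values _
  unfold Spec_majorLabel
  rw [pvA_eq, pvB_eq]
  rcases h : values.map (fun v => PySem.Str.slice v none (some 12)) with _ | ⟨y, t⟩
  · rfl
  · exact pvAns_perm _ _ (by simp) (PySem.List.sorted_perm _ _ _).symm
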